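-- pv_equiv track=rewrite | github.com/yeseong31/Coding_Test_with_Python | ch12/12_A10.py | solution
-- ===== SOURCE A (Python) =====
-- def rotation(key, m):
--     ret = [[0] * m for _ in range(m)]
--     for r in range(m):
--         for c in range(m):
--             ret[c][m - 1 - r] = key[r][c]
--     return ret
--
-- def check(lock):
--     lock_len = len(lock) // 3
--     for i in range(lock_len, lock_len * 2):
--         for j in range(lock_len, lock_len * 2):
--             if lock[i][j] != 1:
--                 return False
--     return True
--
-- def solution(key, lock):
--     # 자물쇠 및 열쇠의 한 변의 길이 n, m
--     n, m = len(lock), len(key)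
--     # 자물쇠 확장
--     new_lock = [[0] * (n * 3) for _ in range(n * 3)]
--     # 자물쇠의 중앙 부분에 기존의 자물쇠 형태 삽입
--     for i in range(n):
--         for j in range(n):
--             new_lock[n + i][n + j] = lock[i][j]
--     # 한 칸씩 이동하며 자물쇠와 열쇠가 맞물리는지 확인
--     for i in range(n * 2):
--         for j in range(n * 2):
--             # 돌려가면서 확인
--             for _ in range(4):
--                 key = rotation(key, m)
--                 for a in range(m):
--                     for b in range(m):
--                         new_lock[i + a][j + b] += key[a][b]
--                 if check(new_lock):
--                     return True
--                 # 자물쇠에서 열쇠 다시 빼기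
--                 for a in range(m):
--                     for b in range(m):
--                         new_lock[i + a][j + b] -= key[a][b]
--     return False
-- ===== SOURCE B (Python) =====
-- def solution(key, lock):
--     n, m = len(lock), len(key)
--     k = key
--     for _ in range(4):
--         k = [[k[m - 1 - c][r] for c in range(m)] for r in range(m)]
--         for i in range(2 * n):
--             for j in range(2 * n):
--                 if all(lock[r][c] + _bump(k, r + n - i, c + n - j, m) == 1
--                        for r in range(n) for c in range(n)):
--                     return True
--     return False
--
-- def _bump(k, a, b, m):
--     return k[a][b] if 0 <= a < m and 0 <= b < m else 0
-- ===== Notes on version B (the rewrite author's own statement) =====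
-- stated objective: simpler
-- what changed: A builds a mutable 3n x 3n expanded board and, per offset and rotation, adds the key, checks the centre third, and subtracts it back; B keeps no board at all and directly tests, per rotation and offset, that every lock cell plus the key bump overlapping it equals 1, with rotations as index comprehensions instead of cell-by-cell assignment into a zero matrix. B also short-circuits at the first mismatching lock cell, while A always pays the full add/check/subtract per rotation.
-- outside the precondition, e.g. on solution([[0, 0, 0], [0, 1, 0], [0, 0, 0]], [[0]]): A returns True, B returns True; on solution([[]], []): A returns False, B raises IndexError
import Mathlib
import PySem

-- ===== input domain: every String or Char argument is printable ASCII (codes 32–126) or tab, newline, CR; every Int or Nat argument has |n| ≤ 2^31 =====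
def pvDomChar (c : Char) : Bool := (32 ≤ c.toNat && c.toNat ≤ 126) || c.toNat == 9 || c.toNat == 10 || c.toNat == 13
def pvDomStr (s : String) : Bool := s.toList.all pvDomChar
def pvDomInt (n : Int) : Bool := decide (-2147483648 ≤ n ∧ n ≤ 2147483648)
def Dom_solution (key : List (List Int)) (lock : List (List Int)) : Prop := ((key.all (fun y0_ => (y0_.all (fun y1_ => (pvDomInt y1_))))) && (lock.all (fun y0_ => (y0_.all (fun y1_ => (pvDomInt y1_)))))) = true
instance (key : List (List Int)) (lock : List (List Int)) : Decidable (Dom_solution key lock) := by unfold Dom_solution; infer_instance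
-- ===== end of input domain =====

-- B replaces A's mutable 3n×3n expanded board (add key / check centre / subtract key) by a direct
-- read-only test per rotation and offset: every lock cell plus the overlapping key bump must equal 1.
-- Objective: simpler (no auxiliary board, no mutation); equivalence is about return values only
-- (A rebinds only its local variables, no caller-visible mutation).

-- 2-D grid access used by both ports (Python's g[r][c] on indices that are in range under Pre_;
-- out of range it yields the default 0, which Pre_ excludes for the Python reads).
def g2 (g : List (List Int)) (r c : Nat) : Int := (g.getD r []).getD c 0
def set2 (g : List (List Int)) (r c : Nat) (v : Int) : List (List Int) :=
  g.set r ((g.getD r []).set c v)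
def mod2 (g : List (List Int)) (r c : Nat) (f : Int → Int) : List (List Int) :=
  set2 g r c (f (g2 g r c))

-- ===== PORT A =====
-- rotation(key, m): fill an m×m zero grid with ret[c][m-1-r] = key[r][c]
def rotationA (key : List (List Int)) (m : Nat) : List (List Int) :=
  (List.range' 0 m).foldl
    (fun ret r => (List.range' 0 m).foldl
      (fun ret c => set2 ret c (m - 1 - r) (g2 key r c)) ret)
    (List.replicate m (List.replicate m 0))

-- check(lock): the middle third must be all 1
def checkA (g : List (List Int)) : Bool :=
  (List.range' (g.length / 3) (g.length / 3)).all fun i =>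
    (List.range' (g.length / 3) (g.length / 3)).all fun j => g2 g i j == 1

-- new_lock[i+a][j+b] += key[a][b] over a,b in range(m)
def addKeyA (key g : List (List Int)) (i j m : Nat) : List (List Int) :=
  (List.range' 0 m).foldl
    (fun g a => (List.range' 0 m).foldl
      (fun g b => mod2 g (i + a) (j + b) (fun x => x + g2 key a b)) g) g

-- new_lock[i+a][j+b] -= key[a][b]
def subKeyA (key g : List (List Int)) (i j m : Nat) : List (List Int) :=
  (List.range' 0 m).foldl
    (fun g a => (List.range' 0 m).foldl
      (fun g b => mod2 g (i + a) (j + b) (fun x => x - g2 key a b)) g) g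

-- for _ in range(4): rotate, add, check (early return True), subtract
def loop4A : Nat → List (List Int) → List (List Int) → Nat → Nat → Nat →
    Bool × List (List Int) × List (List Int)
  | 0, key, g, _, _, _ => (false, key, g)
  | t + 1, key, g, i, j, m =>
      let key' := rotationA key m
      let g' := addKeyA key' g i j m
      if checkA g' then (true, key', g')
      else loop4A t key' (subKeyA key' g' i j m) i j m

-- for j in range(n*2)
def loopJA : List Nat → List (List Int) → List (List Int) → Nat → Nat →
    Bool × List (List Int) × List (List Int)
  | [], key, g, _, _ => (false, key, g)
  | j :: js, key, g, i, m =>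
      match loop4A 4 key g i j m with
      | (true, k, g') => (true, k, g')
      | (false, k, g') => loopJA js k g' i m

-- for i in range(n*2)
def loopIA : List Nat → List (List Int) → List (List Int) → Nat → Nat →
    Bool × List (List Int) × List (List Int)
  | [], key, g, _, _ => (false, key, g)
  | i :: is, key, g, n, m =>
      match loopJA (List.range' 0 (n * 2)) key g i m with
      | (true, k, g') => (true, k, g')
      | (false, k, g') => loopIA is k g' n m

-- new_lock with lock embedded in the centre
def embedA (lock : List (List Int)) (n : Nat) : List (List Int) :=
  (List.range' 0 n).foldl
    (fun g i => (List.range' 0 n).foldl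
      (fun g j => set2 g (n + i) (n + j) (g2 lock i j)) g)
    (List.replicate (n * 3) (List.replicate (n * 3) (0 : Int)))

def solution (key : List (List Int)) (lock : List (List Int)) : Bool :=
  let n := lock.length
  let m := key.length
  (loopIA (List.range' 0 (n * 2)) key (embedA lock n) n m).1

-- ===== PORT B =====
-- k = [[k[m-1-c][r] for c in range(m)] for r in range(m)]
def rotB (m : Nat) (k : List (List Int)) : List (List Int) :=
  (List.range' 0 m).map fun r => (List.range' 0 m).map fun c => g2 k (m - 1 - c) r

-- _bump(k, a, b, m)
def bumpB (k : List (List Int)) (a b : Int) (m : Nat) : Int :=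
  if 0 ≤ a ∧ a < (m : Int) ∧ 0 ≤ b ∧ b < (m : Int) then g2 k a.toNat b.toNat else 0

-- all(lock[r][c] + _bump(k, r+n-i, c+n-j, m) == 1 for r in range(n) for c in range(n))
def fitsB (k lock : List (List Int)) (n m i j : Nat) : Bool :=
  (List.range' 0 n).all fun r => (List.range' 0 n).all fun c =>
    g2 lock r c + bumpB k ((r : Int) + n - i) ((c : Int) + n - j) m == 1

-- for _ in range(4): rotate, then scan all offsets
def altLoopB : Nat → List (List Int) → List (List Int) → Nat → Nat → Bool
  | 0, _, _, _, _ => false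
  | t + 1, k, lock, n, m =>
      let k' := rotB m k
      if (List.range' 0 (2 * n)).any (fun i =>
           (List.range' 0 (2 * n)).any fun j => fitsB k' lock n m i j) then true
      else altLoopB t k' lock n m

def solution_alt (key : List (List Int)) (lock : List (List Int)) : Bool :=
  altLoopB 4 key lock lock.length key.length

-- ===== PRECONDITION & SPEC =====
-- Pre_ excludes exactly the inputs on which running a port's Python raises IndexError: a lock row
-- shorter than len(lock) or (key being read) a key row shorter than len(key), and a key wider than
-- len(lock)+1, whose bumps step outside A's 3n-wide board — except that A can still return True on
-- such an oversized key via an early match before the out-of-range write, and A ignores a ragged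
-- key when the lock is empty; those two excluded-but-returning corners are cited in the claim.
def Pre_solution (key : List (List Int)) (lock : List (List Int)) : Prop :=
  (∀ row ∈ lock, lock.length ≤ row.length) ∧
  (∀ row ∈ key, key.length ≤ row.length) ∧
  (0 < lock.length → key.length ≤ lock.length + 1)
instance (key : List (List Int)) (lock : List (List Int)) : Decidable (Pre_solution key lock) := by
  unfold Pre_solution; infer_instance

def pvWitness_solution : List (List Int) × List (List Int) := ([[1]], [[0]])

def Spec_solution (key : List (List Int)) (lock : List (List Int)) (out : Bool) : Prop :=
  out = solution_alt key lock
instance (key : List (List Int)) (lock : List (List Int)) (out : Bool) :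
    Decidable (Spec_solution key lock out) := by unfold Spec_solution; infer_instance

-- ===== CLAIM (what is proved, stated in full; the proofs are below) =====
def Claim_equal_solution : Prop := ∀ (key : List (List Int)) (lock : List (List Int)),
  Dom_solution key lock → Pre_solution key lock → Spec_solution key lock (solution key lock)

-- ===== LEMMAS AND PROOFS =====

-- a rectangular grid: R rows, each of length C
def Rect (g : List (List Int)) (R C : Nat) : Prop :=
  g.length = R ∧ ∀ row ∈ g, row.length = C

theorem rect_set2 {g : List (List Int)} {R C : Nat} (h : Rect g R C) (r c : Nat) (v : Int) :
    Rect (set2 g r c v) R C := by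
  obtain ⟨hl, hrow⟩ := h
  by_cases hr : r < g.length
  · refine ⟨by simpa [set2] using hl, ?_⟩
    intro row hm
    rcases List.mem_or_eq_of_mem_set hm with hmem | heq
    · exact hrow _ hmem
    · subst heq
      have hgd : g.getD r [] = g[r] := List.getD_eq_getElem g [] hr
      rw [List.length_set, hgd]
      exact hrow _ (List.getElem_mem hr)
  · have : set2 g r c v = g := by
      simp [set2]; exact List.set_eq_of_length_le (by omega)
    rw [this]; exact ⟨hl, hrow⟩

theorem g2_set2_self {g : List (List Int)} {R C r c : Nat} (h : Rect g R C)
    (hr : r < R) (hc : c < C) (v : Int) : g2 (set2 g r c v) r c = v := by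
  obtain ⟨hl, hrow⟩ := h
  subst hl
  have hrl : g[r].length = C := hrow _ (List.getElem_mem hr)
  simp only [g2, set2, List.getD]
  rw [List.getElem?_set_self hr, Option.getD_some,
      List.getElem?_eq_getElem hr, Option.getD_some,
      List.getElem?_set_self (by omega), Option.getD_some]

theorem g2_set2_ne {g : List (List Int)} (r c r' c' : Nat) (v : Int)
    (hne : r' ≠ r ∨ c' ≠ c) : g2 (set2 g r c v) r' c' = g2 g r' c' := by
  rcases hne with hne | hne
  · simp only [g2, set2, List.getD]
    rw [List.getElem?_set_ne (by omega)]
  · by_cases hr : r < g.length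
    · by_cases hrr : r' = r
      · simp only [g2, set2, List.getD, hrr]
        simp [List.getElem?_set_self hr, List.getElem?_eq_getElem hr,
          List.getElem?_set_ne (show c ≠ c' by omega)]
      · simp only [g2, set2, List.getD]
        rw [List.getElem?_set_ne (by omega)]
    · have : set2 g r c v = g := by
        simp [set2]; exact List.set_eq_of_length_le (by omega)
      rw [this]

theorem grid_ext {g g' : List (List Int)} {R C : Nat} (h : Rect g R C) (h' : Rect g' R C)
    (hpt : ∀ r < R, ∀ c < C, g2 g r c = g2 g' r c) : g = g' := by
  obtain ⟨hl, hrow⟩ := h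
  obtain ⟨hl', hrow'⟩ := h'
  apply List.ext_getElem (by omega)
  intro r h1 h2
  have hc1 : g[r].length = C := hrow _ (List.getElem_mem h1)
  have hc2 : g'[r].length = C := hrow' _ (List.getElem_mem h2)
  apply List.ext_getElem (by omega)
  intro c hcc1 hcc2
  have := hpt r (by omega) c (by omega)
  simp only [g2, List.getD, List.getElem?_eq_getElem h1, List.getElem?_eq_getElem h2,
    Option.getD_some] at this
  rwa [List.getElem?_eq_getElem (by omega), List.getElem?_eq_getElem (by omega),
    Option.getD_some, Option.getD_some] at this


theorem rect_foldl {α : Type} {T T' : Nat} (step : List (List Int) → α → List (List Int))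
    (hstep : ∀ g x, Rect g T T' → Rect (step g x) T T') :
    ∀ (l : List α) (g : List (List Int)), Rect g T T' → Rect (l.foldl step g) T T' := by
  intro l
  induction l with
  | nil => intro g h; exact h
  | cons x xs ih => intro g h; exact ih _ (hstep g x h)

theorem rect_mod2 {g : List (List Int)} {R C : Nat} (h : Rect g R C) (r c : Nat) (f : Int → Int) :
    Rect (mod2 g r c f) R C := rect_set2 h r c _

theorem g2_mod2_self {g : List (List Int)} {R C r c : Nat} (h : Rect g R C)
    (hr : r < R) (hc : c < C) (f : Int → Int) : g2 (mod2 g r c f) r c = f (g2 g r c) :=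
  g2_set2_self h hr hc _

-- inner loop of addKeyA/subKeyA (op = + or -), pointwise
theorem opInner_g2 {T : Nat} (op : Int → Int → Int) (key : List (List Int)) (a i j : Nat) :
    ∀ (len s : Nat) (g : List (List Int)), Rect g T T → i + a < T → j + s + len ≤ T →
    ∀ r c,
    g2 ((List.range' s len).foldl
        (fun g b => mod2 g (i + a) (j + b) (fun x => op x (g2 key a b))) g) r c
      = if r = i + a ∧ j + s ≤ c ∧ c < j + s + len
        then op (g2 g r c) (g2 key a (c - j)) else g2 g r c := by
  intro len
  induction len with
  | zero =>
      intro s g hg _ _ r c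
      simp only [List.range'_zero, List.foldl_nil]
      rw [if_neg (by omega)]
  | succ len ih =>
      intro s g hg hia hjs r c
      rw [List.range'_succ]
      simp only [List.foldl_cons]
      set g' := mod2 g (i + a) (j + s) (fun x => op x (g2 key a s)) with hg'
      have hRect' : Rect g' T T := rect_mod2 hg _ _ _
      rw [ih (s + 1) g' hRect' hia (by omega) r c]
      have hpt : ∀ r' c', g2 g' r' c'
          = if r' = i + a ∧ c' = j + s then op (g2 g r' c') (g2 key a s) else g2 g r' c' := by
        intro r' c'
        by_cases he : r' = i + a ∧ c' = j + s
        · obtain ⟨h1, h2⟩ := he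
          subst h1; subst h2
          rw [hg', g2_mod2_self hg (by omega) (by omega)]
          simp
        · rw [hg', mod2, g2_set2_ne]
          · simp [he]
          · omega
      by_cases hc : r = i + a ∧ j + s ≤ c ∧ c < j + s + (len + 1)
      · obtain ⟨h1, h2, h3⟩ := hc
        by_cases hcs : c = j + s
        · have : ¬ (r = i + a ∧ j + (s + 1) ≤ c ∧ c < j + (s + 1) + len) := by omega
          rw [if_neg this, if_pos ⟨h1, h2, h3⟩, hpt r c, if_pos ⟨h1, hcs⟩]
          have : c - j = s := by omega
          rw [this]
        · have h4 : r = i + a ∧ j + (s + 1) ≤ c ∧ c < j + (s + 1) + len := by omega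
          rw [if_pos h4, if_pos ⟨h1, h2, h3⟩, hpt r c, if_neg (by omega)]
      · rw [if_neg (by omega), if_neg hc, hpt r c, if_neg (by omega)]

-- outer loop of addKeyA/subKeyA, pointwise
theorem opOuter_g2 {T : Nat} (op : Int → Int → Int) (key : List (List Int)) (i j m : Nat) :
    ∀ (len s : Nat) (g : List (List Int)), Rect g T T → i + s + len ≤ T → j + m ≤ T →
    ∀ r c,
    g2 ((List.range' s len).foldl
        (fun g a => (List.range' 0 m).foldl
          (fun g b => mod2 g (i + a) (j + b) (fun x => op x (g2 key a b))) g) g) r c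
      = if i + s ≤ r ∧ r < i + s + len ∧ j ≤ c ∧ c < j + m
        then op (g2 g r c) (g2 key (r - i) (c - j)) else g2 g r c := by
  intro len
  induction len with
  | zero =>
      intro s g hg _ _ r c
      simp only [List.range'_zero, List.foldl_nil]
      rw [if_neg (by omega)]
  | succ len ih =>
      intro s g hg hbound hjm r c
      rw [List.range'_succ]
      simp only [List.foldl_cons]
      set g' := (List.range' 0 m).foldl
          (fun g b => mod2 g (i + s) (j + b) (fun x => op x (g2 key s b))) g with hg'
      have hRect' : Rect g' T T :=
        rect_foldl _ (fun _ _ hh => rect_mod2 hh _ _ _) _ _ hg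
      rw [ih (s + 1) g' hRect' (by omega) hjm r c]
      have hpt : ∀ r' c', g2 g' r' c'
          = if r' = i + s ∧ j ≤ c' ∧ c' < j + m
            then op (g2 g r' c') (g2 key s (c' - j)) else g2 g r' c' := by
        intro r' c'
        rw [hg', opInner_g2 op key s i j m 0 g hg (by omega) (by omega) r' c']
        simp
      by_cases hc : i + s ≤ r ∧ r < i + s + (len + 1) ∧ j ≤ c ∧ c < j + m
      · obtain ⟨h1, h2, h3, h4⟩ := hc
        by_cases hrs : r = i + s
        · have : ¬ (i + (s + 1) ≤ r ∧ r < i + (s + 1) + len ∧ j ≤ c ∧ c < j + m) := by omega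
          rw [if_neg this, if_pos ⟨h1, h2, h3, h4⟩, hpt r c, if_pos ⟨hrs, h3, h4⟩]
          have : r - i = s := by omega
          rw [this]
        · have h5 : i + (s + 1) ≤ r ∧ r < i + (s + 1) + len ∧ j ≤ c ∧ c < j + m := by omega
          rw [if_pos h5, if_pos ⟨h1, h2, h3, h4⟩, hpt r c, if_neg (by omega)]
      · rw [if_neg (by omega), if_neg hc, hpt r c, if_neg (by omega)]

theorem rect_addKeyA {T : Nat} {g : List (List Int)} (key : List (List Int)) (i j m : Nat)
    (h : Rect g T T) : Rect (addKeyA key g i j m) T T :=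
  rect_foldl _ (fun _ _ hh => rect_foldl _ (fun _ _ hhh => rect_mod2 hhh _ _ _) _ _ hh) _ _ h

theorem rect_subKeyA {T : Nat} {g : List (List Int)} (key : List (List Int)) (i j m : Nat)
    (h : Rect g T T) : Rect (subKeyA key g i j m) T T :=
  rect_foldl _ (fun _ _ hh => rect_foldl _ (fun _ _ hhh => rect_mod2 hhh _ _ _) _ _ hh) _ _ h

theorem g2_addKeyA {T : Nat} {g : List (List Int)} (key : List (List Int)) (i j m : Nat)
    (h : Rect g T T) (him : i + m ≤ T) (hjm : j + m ≤ T) (r c : Nat) :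
    g2 (addKeyA key g i j m) r c
      = if i ≤ r ∧ r < i + m ∧ j ≤ c ∧ c < j + m
        then g2 g r c + g2 key (r - i) (c - j) else g2 g r c := by
  have := opOuter_g2 (· + ·) key i j m m 0 g h (by omega) hjm r c
  simpa [addKeyA] using this

theorem g2_subKeyA {T : Nat} {g : List (List Int)} (key : List (List Int)) (i j m : Nat)
    (h : Rect g T T) (him : i + m ≤ T) (hjm : j + m ≤ T) (r c : Nat) :
    g2 (subKeyA key g i j m) r c
      = if i ≤ r ∧ r < i + m ∧ j ≤ c ∧ c < j + m
        then g2 g r c - g2 key (r - i) (c - j) else g2 g r c := by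
  have := opOuter_g2 (· - ·) key i j m m 0 g h (by omega) hjm r c
  simpa [subKeyA] using this

theorem sub_add_restore {T : Nat} {g : List (List Int)} (key : List (List Int)) (i j m : Nat)
    (h : Rect g T T) (him : i + m ≤ T) (hjm : j + m ≤ T) :
    subKeyA key (addKeyA key g i j m) i j m = g := by
  have hA : Rect (addKeyA key g i j m) T T := rect_addKeyA key i j m h
  apply grid_ext (rect_subKeyA key i j m hA) h
  intro r hr c hc
  rw [g2_subKeyA key i j m hA him hjm r c, g2_addKeyA key i j m h him hjm r c]
  split_ifs with hcond
  · ring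
  · rfl


theorem rect_replicate (a b : Nat) : Rect (List.replicate a (List.replicate b (0 : Int))) a b := by
  refine ⟨by simp, ?_⟩
  intro row h
  simp [List.eq_of_mem_replicate h]

theorem g2_replicate (a b r c : Nat) :
    g2 (List.replicate a (List.replicate b (0 : Int))) r c = 0 := by
  simp only [g2, List.getD, List.getElem?_replicate]
  split_ifs <;> (simp [List.getElem?_replicate]; try split_ifs <;> simp)

-- inner loop of embedA, pointwise (overwrite semantics)
theorem embedInner_g2 {T T' : Nat} (lock : List (List Int)) (n i : Nat) :
    ∀ (len s : Nat) (g : List (List Int)), Rect g T T' → n + i < T → n + s + len ≤ T' →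
    ∀ r c,
    g2 ((List.range' s len).foldl
        (fun g j => set2 g (n + i) (n + j) (g2 lock i j)) g) r c
      = if r = n + i ∧ n + s ≤ c ∧ c < n + s + len
        then g2 lock i (c - n) else g2 g r c := by
  intro len
  induction len with
  | zero =>
      intro s g hg _ _ r c
      simp only [List.range'_zero, List.foldl_nil]
      rw [if_neg (by omega)]
  | succ len ih =>
      intro s g hg hni hbound r c
      rw [List.range'_succ]
      simp only [List.foldl_cons]
      set g' := set2 g (n + i) (n + s) (g2 lock i s) with hg'
      have hRect' : Rect g' T T' := rect_set2 hg _ _ _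
      rw [ih (s + 1) g' hRect' hni (by omega) r c]
      have hpt : ∀ r' c', g2 g' r' c'
          = if r' = n + i ∧ c' = n + s then g2 lock i s else g2 g r' c' := by
        intro r' c'
        by_cases he : r' = n + i ∧ c' = n + s
        · obtain ⟨h1, h2⟩ := he
          subst h1; subst h2
          rw [hg', g2_set2_self hg (by omega) (by omega)]
          simp
        · rw [hg', g2_set2_ne _ _ _ _ _ (by omega)]
          simp [he]
      by_cases hc : r = n + i ∧ n + s ≤ c ∧ c < n + s + (len + 1)
      · obtain ⟨h1, h2, h3⟩ := hc
        by_cases hcs : c = n + s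
        · have : ¬ (r = n + i ∧ n + (s + 1) ≤ c ∧ c < n + (s + 1) + len) := by omega
          rw [if_neg this, if_pos ⟨h1, h2, h3⟩, hpt r c, if_pos ⟨h1, hcs⟩]
          have : c - n = s := by omega
          rw [this]
        · have h4 : r = n + i ∧ n + (s + 1) ≤ c ∧ c < n + (s + 1) + len := by omega
          rw [if_pos h4, if_pos ⟨h1, h2, h3⟩]
      · rw [if_neg (by omega), if_neg hc, hpt r c, if_neg (by omega)]

-- outer loop of embedA, pointwise
theorem embedOuter_g2 {T T' : Nat} (lock : List (List Int)) (n : Nat) :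
    ∀ (len s : Nat) (g : List (List Int)), Rect g T T' → n + s + len ≤ T → n + n ≤ T' →
    ∀ r c,
    g2 ((List.range' s len).foldl
        (fun g i => (List.range' 0 n).foldl
          (fun g j => set2 g (n + i) (n + j) (g2 lock i j)) g) g) r c
      = if n + s ≤ r ∧ r < n + s + len ∧ n ≤ c ∧ c < n + n
        then g2 lock (r - n) (c - n) else g2 g r c := by
  intro len
  induction len with
  | zero =>
      intro s g hg _ _ r c
      simp only [List.range'_zero, List.foldl_nil]
      rw [if_neg (by omega)]
  | succ len ih =>
      intro s g hg hbound hT' r c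
      rw [List.range'_succ]
      simp only [List.foldl_cons]
      set g' := (List.range' 0 n).foldl
          (fun g j => set2 g (n + s) (n + j) (g2 lock s j)) g with hg'
      have hRect' : Rect g' T T' := rect_foldl _ (fun _ _ hh => rect_set2 hh _ _ _) _ _ hg
      rw [ih (s + 1) g' hRect' (by omega) hT' r c]
      have hpt : ∀ r' c', g2 g' r' c'
          = if r' = n + s ∧ n ≤ c' ∧ c' < n + n
            then g2 lock s (c' - n) else g2 g r' c' := by
        intro r' c'
        rw [hg', embedInner_g2 lock n s n 0 g hg (by omega) (by omega) r' c']
        simp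
      by_cases hc : n + s ≤ r ∧ r < n + s + (len + 1) ∧ n ≤ c ∧ c < n + n
      · obtain ⟨h1, h2, h3, h4⟩ := hc
        by_cases hrs : r = n + s
        · have : ¬ (n + (s + 1) ≤ r ∧ r < n + (s + 1) + len ∧ n ≤ c ∧ c < n + n) := by omega
          rw [if_neg this, if_pos ⟨h1, h2, h3, h4⟩, hpt r c, if_pos ⟨hrs, h3, h4⟩]
          have : r - n = s := by omega
          rw [this]
        · have h5 : n + (s + 1) ≤ r ∧ r < n + (s + 1) + len ∧ n ≤ c ∧ c < n + n := by omega
          rw [if_pos h5, if_pos ⟨h1, h2, h3, h4⟩]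
      · rw [if_neg (by omega), if_neg hc, hpt r c, if_neg (by omega)]

theorem rect_embedA (lock : List (List Int)) (n : Nat) :
    Rect (embedA lock n) (n * 3) (n * 3) := by
  unfold embedA
  exact rect_foldl _
    (fun _ _ hh => rect_foldl _ (fun _ _ hhh => rect_set2 hhh _ _ _) _ _ hh) _ _
    (rect_replicate _ _)

theorem g2_embedA (lock : List (List Int)) (n r c : Nat) :
    g2 (embedA lock n) r c
      = if n ≤ r ∧ r < n + n ∧ n ≤ c ∧ c < n + n
        then g2 lock (r - n) (c - n) else 0 := by
  unfold embedA
  rw [embedOuter_g2 lock n n 0 _ (rect_replicate _ _) (by omega) (by omega) r c]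
  simp only [Nat.add_zero, g2_replicate]

-- inner loop of rotationA (fixed source row r0 writes column m-1-r0), pointwise
theorem rotInner_g2 (key : List (List Int)) (m r0 : Nat) (hr0 : r0 < m) :
    ∀ (len s : Nat) (ret : List (List Int)), Rect ret m m → s + len ≤ m →
    ∀ a b,
    g2 ((List.range' s len).foldl
        (fun ret c => set2 ret c (m - 1 - r0) (g2 key r0 c)) ret) a b
      = if s ≤ a ∧ a < s + len ∧ b = m - 1 - r0 then g2 key r0 a else g2 ret a b := by
  intro len
  induction len with
  | zero =>
      intro s ret hret _ a b
      simp only [List.range'_zero, List.foldl_nil]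
      rw [if_neg (by omega)]
  | succ len ih =>
      intro s ret hret hbound a b
      rw [List.range'_succ]
      simp only [List.foldl_cons]
      set ret' := set2 ret s (m - 1 - r0) (g2 key r0 s) with hret'
      have hRect' : Rect ret' m m := rect_set2 hret _ _ _
      rw [ih (s + 1) ret' hRect' (by omega) a b]
      have hpt : ∀ a' b', g2 ret' a' b'
          = if a' = s ∧ b' = m - 1 - r0 then g2 key r0 s else g2 ret a' b' := by
        intro a' b'
        by_cases he : a' = s ∧ b' = m - 1 - r0
        · obtain ⟨h1, h2⟩ := he
          subst h1; subst h2
          rw [hret', g2_set2_self hret (by omega) (by omega)]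
          simp
        · rw [hret', g2_set2_ne _ _ _ _ _ (by omega)]
          simp [he]
      by_cases hc : s ≤ a ∧ a < s + (len + 1) ∧ b = m - 1 - r0
      · obtain ⟨h1, h2, h3⟩ := hc
        by_cases has : a = s
        · have : ¬ (s + 1 ≤ a ∧ a < s + 1 + len ∧ b = m - 1 - r0) := by omega
          rw [if_neg this, if_pos ⟨h1, h2, h3⟩, hpt a b, if_pos ⟨has, h3⟩, has]
        · have h4 : s + 1 ≤ a ∧ a < s + 1 + len ∧ b = m - 1 - r0 := by omega
          rw [if_pos h4, if_pos ⟨h1, h2, h3⟩]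
      · rw [if_neg (by omega), if_neg hc, hpt a b, if_neg (by omega)]

-- outer loop of rotationA, pointwise
theorem rotOuter_g2 (key : List (List Int)) (m : Nat) :
    ∀ (len s : Nat) (ret : List (List Int)), Rect ret m m → s + len ≤ m →
    ∀ a b,
    g2 ((List.range' s len).foldl
        (fun ret r => (List.range' 0 m).foldl
          (fun ret c => set2 ret c (m - 1 - r) (g2 key r c)) ret) ret) a b
      = if a < m ∧ b < m ∧ s ≤ m - 1 - b ∧ m - 1 - b < s + len
        then g2 key (m - 1 - b) a else g2 ret a b := by
  intro len
  induction len with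
  | zero =>
      intro s ret hret _ a b
      simp only [List.range'_zero, List.foldl_nil]
      rw [if_neg (by omega)]
  | succ len ih =>
      intro s ret hret hbound a b
      rw [List.range'_succ]
      simp only [List.foldl_cons]
      set ret' := (List.range' 0 m).foldl
          (fun ret c => set2 ret c (m - 1 - s) (g2 key s c)) ret with hret'
      have hRect' : Rect ret' m m := rect_foldl _ (fun _ _ hh => rect_set2 hh _ _ _) _ _ hret
      rw [ih (s + 1) ret' hRect' (by omega) a b]
      have hpt : ∀ a' b', g2 ret' a' b'
          = if a' < m ∧ b' = m - 1 - s then g2 key s a' else g2 ret a' b' := by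
        intro a' b'
        rw [hret', rotInner_g2 key m s (by omega) m 0 ret hret (by omega) a' b']
        simp
      by_cases hIH : a < m ∧ b < m ∧ s + 1 ≤ m - 1 - b ∧ m - 1 - b < s + 1 + len
      · rw [if_pos hIH, if_pos (by omega)]
      · rw [if_neg hIH, hpt a b]
        by_cases hE : a < m ∧ b = m - 1 - s
        · rw [if_pos hE, if_pos (by omega)]
          have : m - 1 - b = s := by omega
          rw [this]
        · rw [if_neg hE, if_neg (by omega)]

theorem rect_rotationA (key : List (List Int)) (m : Nat) : Rect (rotationA key m) m m := by
  unfold rotationA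
  exact rect_foldl _
    (fun _ _ hh => rect_foldl _ (fun _ _ hhh => rect_set2 hhh _ _ _) _ _ hh) _ _
    (rect_replicate _ _)

theorem rect_rotB (k : List (List Int)) (m : Nat) : Rect (rotB m k) m m := by
  refine ⟨by simp [rotB], ?_⟩
  intro row h
  simp only [rotB, List.mem_map] at h
  obtain ⟨r, _, rfl⟩ := h
  simp

theorem g2_rotB (k : List (List Int)) {m a b : Nat} (ha : a < m) (hb : b < m) :
    g2 (rotB m k) a b = g2 k (m - 1 - b) a := by
  simp only [rotB, g2, List.getD]
  rw [List.getElem?_map, List.getElem?_range' (by simpa using ha)]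
  simp only [Option.map_some, Option.getD_some, Nat.zero_add]
  rw [List.getElem?_map, List.getElem?_range' (by simpa using hb)]
  simp

theorem rotationA_eq_rotB (key : List (List Int)) (m : Nat) : rotationA key m = rotB m key := by
  apply grid_ext (rect_rotationA key m) (rect_rotB key m)
  intro a ha b hb
  rw [g2_rotB key ha hb]
  unfold rotationA
  rw [rotOuter_g2 key m m 0 _ (rect_replicate _ _) (by omega) a b,
      if_pos ⟨ha, hb, by omega, by omega⟩]


theorem bool_eq_of_iff {a b : Bool} (h : a = true ↔ b = true) : a = b := by
  cases a <;> cases b <;> simp_all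

-- the value of the expanded board after laying the key at offset (i, j), on a centre cell
theorem g2_addKey_embed (k lock : List (List Int)) (n m i j r c : Nat)
    (him : i + m ≤ n * 3) (hjm : j + m ≤ n * 3) (hr : r < n) (hc : c < n) :
    g2 (addKeyA k (embedA lock n) i j m) (n + r) (n + c)
      = g2 lock r c + bumpB k ((r : Int) + n - i) ((c : Int) + n - j) m := by
  have hR : Rect (embedA lock n) (n * 3) (n * 3) := rect_embedA lock n
  rw [g2_addKeyA k i j m hR him hjm]
  by_cases hw : i ≤ n + r ∧ n + r < i + m ∧ j ≤ n + c ∧ n + c < j + m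
  · rw [if_pos hw, g2_embedA, if_pos (by omega), bumpB,
      if_pos (by constructor <;> [omega; constructor <;> [omega; constructor <;> omega]])]
    have h1 : n + r - n = r := by omega
    have h2 : n + c - n = c := by omega
    have h3 : (((r : Int) + n - i).toNat) = n + r - i := by omega
    have h4 : (((c : Int) + n - j).toNat) = n + c - j := by omega
    rw [h1, h2, h3, h4]
  · rw [if_neg hw, g2_embedA, if_pos (by omega), bumpB, if_neg (by omega)]
    have h1 : n + r - n = r := by omega
    have h2 : n + c - n = c := by omega
    rw [h1, h2, Int.add_zero]

-- check of the expanded board = B's direct per-cell test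
theorem checkA_addKey (k lock : List (List Int)) (n m i j : Nat)
    (him : i + m ≤ n * 3) (hjm : j + m ≤ n * 3) :
    checkA (addKeyA k (embedA lock n) i j m) = fitsB k lock n m i j := by
  apply bool_eq_of_iff
  have hRa : Rect (addKeyA k (embedA lock n) i j m) (n * 3) (n * 3) :=
    rect_addKeyA k i j m (rect_embedA lock n)
  have hlen : (addKeyA k (embedA lock n) i j m).length / 3 = n := by
    rw [hRa.1]; omega
  simp only [checkA, fitsB, hlen, List.all_eq_true, List.mem_range'_1, beq_iff_eq]
  constructor
  · intro h r hr c hc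
    have := h (n + r) (by omega) (n + c) (by omega)
    rwa [g2_addKey_embed k lock n m i j r c him hjm (by omega) (by omega)] at this
  · intro h i' hi' j' hj'
    have hre : i' = n + (i' - n) := by omega
    have hce : j' = n + (j' - n) := by omega
    rw [hre, hce,
      g2_addKey_embed k lock n m i j (i' - n) (j' - n) him hjm (by omega) (by omega)]
    exact h (i' - n) (by omega) (j' - n) (by omega)

theorem rotB_congr {k k' : List (List Int)} (m : Nat)
    (h : ∀ r < m, ∀ c < m, g2 k r c = g2 k' r c) : rotB m k = rotB m k' := by
  simp only [rotB]
  apply List.map_congr_left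
  intro r hr
  apply List.map_congr_left
  intro c hc
  rw [List.mem_range'_1] at hr hc
  exact h _ (by omega) _ (by omega)

theorem g2_rot4 (k : List (List Int)) {m a b : Nat} (ha : a < m) (hb : b < m) :
    g2 (rotB m (rotB m (rotB m (rotB m k)))) a b = g2 k a b := by
  rw [g2_rotB _ ha hb, g2_rotB _ (by omega) ha, g2_rotB _ (by omega) (by omega),
      g2_rotB _ (by omega) (by omega)]
  congr 1 <;> omega

-- the four rotations A tries at one offset, as B computes them
def F4 (k lock : List (List Int)) (n m i j : Nat) : Bool :=
  fitsB (rotB m k) lock n m i j ||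
  (fitsB (rotB m (rotB m k)) lock n m i j ||
  (fitsB (rotB m (rotB m (rotB m k))) lock n m i j ||
   fitsB (rotB m (rotB m (rotB m (rotB m k)))) lock n m i j))

theorem F4_congr {k k' : List (List Int)} (lock : List (List Int)) (n m i j : Nat)
    (h : ∀ r < m, ∀ c < m, g2 k r c = g2 k' r c) :
    F4 k lock n m i j = F4 k' lock n m i j := by
  unfold F4
  rw [rotB_congr m h]

theorem loop4A_step (lock : List (List Int)) (n m i j : Nat)
    (him : i + m ≤ n * 3) (hjm : j + m ≤ n * 3) (t : Nat) (k : List (List Int)) :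
    loop4A (t + 1) k (embedA lock n) i j m
      = if fitsB (rotB m k) lock n m i j
        then (true, rotB m k, addKeyA (rotB m k) (embedA lock n) i j m)
        else loop4A t (rotB m k) (embedA lock n) i j m := by
  simp only [loop4A, rotationA_eq_rotB,
    checkA_addKey (rotB m k) lock n m i j him hjm,
    sub_add_restore (rotB m k) i j m (rect_embedA lock n) him hjm]

theorem loop4A_fst (lock : List (List Int)) (n m i j : Nat)
    (him : i + m ≤ n * 3) (hjm : j + m ≤ n * 3) (k : List (List Int)) :
    (loop4A 4 k (embedA lock n) i j m).1 = F4 k lock n m i j := by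
  unfold F4
  rw [loop4A_step lock n m i j him hjm 3 k]
  by_cases h1 : fitsB (rotB m k) lock n m i j
  · simp [h1]
  rw [if_neg h1, loop4A_step lock n m i j him hjm 2 (rotB m k)]
  by_cases h2 : fitsB (rotB m (rotB m k)) lock n m i j
  · simp [h1, h2]
  rw [if_neg h2, loop4A_step lock n m i j him hjm 1 (rotB m (rotB m k))]
  by_cases h3 : fitsB (rotB m (rotB m (rotB m k))) lock n m i j
  · simp [h1, h2, h3]
  rw [if_neg h3, loop4A_step lock n m i j him hjm 0 (rotB m (rotB m (rotB m k)))]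
  by_cases h4 : fitsB (rotB m (rotB m (rotB m (rotB m k)))) lock n m i j
  · simp [h1, h2, h3, h4]
  · simp [h1, h2, h3, h4, loop4A]

theorem loop4A_false (lock : List (List Int)) (n m i j : Nat)
    (him : i + m ≤ n * 3) (hjm : j + m ≤ n * 3) (k : List (List Int))
    (hF : F4 k lock n m i j = false) :
    loop4A 4 k (embedA lock n) i j m
      = (false, rotB m (rotB m (rotB m (rotB m k))), embedA lock n) := by
  unfold F4 at hF
  simp only [Bool.or_eq_false_iff] at hF
  obtain ⟨h1, h2, h3, h4⟩ := hF
  rw [loop4A_step lock n m i j him hjm 3 k, if_neg (by simp [h1]),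
      loop4A_step lock n m i j him hjm 2 _, if_neg (by simp [h2]),
      loop4A_step lock n m i j him hjm 1 _, if_neg (by simp [h3]),
      loop4A_step lock n m i j him hjm 0 _, if_neg (by simp [h4])]
  rfl

theorem loopJA_eq (lock : List (List Int)) (n m i : Nat) (hi : i + m ≤ n * 3) :
    ∀ (js : List Nat) (k : List (List Int)), (∀ j ∈ js, j + m ≤ n * 3) →
    (loopJA js k (embedA lock n) i m).1 = js.any (fun j => F4 k lock n m i j) ∧
    (js.any (fun j => F4 k lock n m i j) = false →
      ∃ k', (∀ r < m, ∀ c < m, g2 k' r c = g2 k r c) ∧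
        loopJA js k (embedA lock n) i m = (false, k', embedA lock n)) := by
  intro js
  induction js with
  | nil =>
      intro k _
      exact ⟨rfl, fun _ => ⟨k, fun _ _ _ _ => rfl, rfl⟩⟩
  | cons j js ih =>
      intro k hbound
      have hjm : j + m ≤ n * 3 := hbound j (by simp)
      by_cases hF : F4 k lock n m i j
      · rcases hres : loop4A 4 k (embedA lock n) i j m with ⟨b, k2, gg⟩
        have hb : b = true := by
          have := loop4A_fst lock n m i j hi hjm k
          rw [hres, hF] at this
          exact this
        subst hb
        refine ⟨?_, ?_⟩
        · simp [loopJA, hres, hF]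
        · intro hall
          simp [hF] at hall
      · have hres := loop4A_false lock n m i j hi hjm k (Bool.not_eq_true _ ▸ eq_false_of_ne_true hF)
        set k4 := rotB m (rotB m (rotB m (rotB m k))) with hk4
        have hread : ∀ r < m, ∀ c < m, g2 k4 r c = g2 k r c := by
          intro r hr c hc
          exact g2_rot4 k hr hc
        have hFun : (fun j' => F4 k4 lock n m i j') = (fun j' => F4 k lock n m i j') :=
          funext fun j' => F4_congr lock n m i j' hread
        have hih := ih k4 (fun j' hj' => hbound j' (by simp [hj']))
        rw [hFun] at hih
        refine ⟨?_, ?_⟩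
        · rw [show loopJA (j :: js) k (embedA lock n) i m
              = loopJA js k4 (embedA lock n) i m by simp [loopJA, hres]]
          rw [hih.1]
          simp [hF]
        · intro hall
          simp only [List.any_cons, Bool.or_eq_false_iff] at hall
          obtain ⟨k', hk'read, hk'⟩ := hih.2 hall.2
          refine ⟨k', ?_, ?_⟩
          · intro r hr c hc
            rw [hk'read r hr c hc, hread r hr c hc]
          · rw [show loopJA (j :: js) k (embedA lock n) i m
                = loopJA js k4 (embedA lock n) i m by simp [loopJA, hres]]
            exact hk'

theorem loopIA_eq (lock : List (List Int)) (n m : Nat)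
    (hm : ∀ x : Nat, x < n * 2 → x + m ≤ n * 3) :
    ∀ (is : List Nat) (k : List (List Int)), (∀ i ∈ is, i + m ≤ n * 3) →
    (loopIA is k (embedA lock n) n m).1
      = is.any (fun i => (List.range' 0 (n * 2)).any (fun j => F4 k lock n m i j)) ∧
    (is.any (fun i => (List.range' 0 (n * 2)).any (fun j => F4 k lock n m i j)) = false →
      ∃ k', (∀ r < m, ∀ c < m, g2 k' r c = g2 k r c) ∧
        loopIA is k (embedA lock n) n m = (false, k', embedA lock n)) := by
  intro is
  induction is with
  | nil =>
      intro k _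
      exact ⟨rfl, fun _ => ⟨k, fun _ _ _ _ => rfl, rfl⟩⟩
  | cons i is ih =>
      intro k hbound
      have hi : i + m ≤ n * 3 := hbound i (by simp)
      have hrange : ∀ j ∈ List.range' 0 (n * 2), j + m ≤ n * 3 := by
        intro j hj
        rw [List.mem_range'_1] at hj
        exact hm j (by omega)
      have hJ := loopJA_eq lock n m i hi (List.range' 0 (n * 2)) k hrange
      by_cases hF : (List.range' 0 (n * 2)).any (fun j => F4 k lock n m i j)
      · rcases hres : loopJA (List.range' 0 (n * 2)) k (embedA lock n) i m with ⟨b, k2, gg⟩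
        have hb : b = true := by
          have := hJ.1
          rw [hres, hF] at this
          exact this
        subst hb
        refine ⟨by simp [loopIA, hres, hF], fun hall => by simp [hF] at hall⟩
      · rw [Bool.not_eq_true] at hF
        obtain ⟨k', hk'read, hk'⟩ := hJ.2 hF
        have hFun : (fun i' => (List.range' 0 (n * 2)).any (fun j => F4 k' lock n m i' j))
            = (fun i' => (List.range' 0 (n * 2)).any (fun j => F4 k lock n m i' j)) := by
          funext i'
          congr 1
          funext j
          exact F4_congr lock n m i' j hk'read
        have hih := ih k' (fun i' hi' => hbound i' (by simp [hi']))
        rw [hFun] at hih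
        refine ⟨?_, ?_⟩
        · rw [show loopIA (i :: is) k (embedA lock n) n m
              = loopIA is k' (embedA lock n) n m by simp [loopIA, hk']]
          rw [hih.1]
          simp [hF]
        · intro hall
          simp only [List.any_cons, Bool.or_eq_false_iff] at hall
          obtain ⟨k'', hk''read, hk''⟩ := hih.2 hall.2
          refine ⟨k'', ?_, ?_⟩
          · intro r hr c hc
            rw [hk''read r hr c hc, hk'read r hr c hc]
          · rw [show loopIA (i :: is) k (embedA lock n) n m
                = loopIA is k' (embedA lock n) n m by simp [loopIA, hk']]
            exact hk''

-- A's whole search, characterised: some offset admits one of the four rotations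
theorem solution_eq_any (key lock : List (List Int))
    (hPre : Pre_solution key lock) :
    solution key lock
      = (List.range' 0 (lock.length * 2)).any (fun i =>
          (List.range' 0 (lock.length * 2)).any (fun j =>
            F4 key lock lock.length key.length i j)) := by
  have hm : ∀ x : Nat, x < lock.length * 2 → x + key.length ≤ lock.length * 3 := by
    intro x hx
    have := hPre.2.2 (show 0 < lock.length by omega)
    omega
  have hI := loopIA_eq lock lock.length key.length hm (List.range' 0 (lock.length * 2)) key
    (fun i hi => by rw [List.mem_range'_1] at hi; exact hm i (by omega))
  simpa [solution] using hI.1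

-- B's whole search, characterised: one of the four rotations admits some offset
theorem alt_eq_any (key lock : List (List Int)) :
    solution_alt key lock
      = ((List.range' 0 (2 * lock.length)).any (fun i =>
           (List.range' 0 (2 * lock.length)).any (fun j =>
             fitsB (rotB key.length key) lock lock.length key.length i j)) ||
         ((List.range' 0 (2 * lock.length)).any (fun i =>
           (List.range' 0 (2 * lock.length)).any (fun j =>
             fitsB (rotB key.length (rotB key.length key)) lock lock.length key.length i j)) ||
         ((List.range' 0 (2 * lock.length)).any (fun i =>
           (List.range' 0 (2 * lock.length)).any (fun j =>
             fitsB (rotB key.length (rotB key.length (rotB key.length key)))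
               lock lock.length key.length i j)) ||
          (List.range' 0 (2 * lock.length)).any (fun i =>
           (List.range' 0 (2 * lock.length)).any (fun j =>
             fitsB (rotB key.length (rotB key.length (rotB key.length (rotB key.length key))))
               lock lock.length key.length i j))))) := by
  simp only [solution_alt, altLoopB]
  split_ifs with h1 h2 h3 h4 <;> simp_all

-- ===== VERDICT (by name: the statement is the Claim_ definition above) =====
theorem solution_spec : Claim_equal_solution := by
  intro key lock _ hPre
  unfold Spec_solution
  rw [solution_eq_any key lock hPre, alt_eq_any key lock,
    show 2 * lock.length = lock.length * 2 from Nat.mul_comm 2 lock.length]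
  apply bool_eq_of_iff
  simp only [List.any_eq_true, F4, Bool.or_eq_true]
  constructor
  · rintro ⟨i, hi, j, hj, h1 | (h2 | (h3 | h4))⟩
    · exact Or.inl ⟨i, hi, j, hj, h1⟩
    · exact Or.inr (Or.inl ⟨i, hi, j, hj, h2⟩)
    · exact Or.inr (Or.inr (Or.inl ⟨i, hi, j, hj, h3⟩))
    · exact Or.inr (Or.inr (Or.inr ⟨i, hi, j, hj, h4⟩))
  · rintro (⟨i, hi, j, hj, h⟩ | (⟨i, hi, j, hj, h⟩ | (⟨i, hi, j, hj, h⟩ | ⟨i, hi, j, hj, h⟩)))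
    · exact ⟨i, hi, j, hj, Or.inl h⟩
    · exact ⟨i, hi, j, hj, Or.inr (Or.inl h)⟩
    · exact ⟨i, hi, j, hj, Or.inr (Or.inr (Or.inl h))⟩
    · exact ⟨i, hi, j, hj, Or.inr (Or.inr (Or.inr h))⟩
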